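-- pv_equiv track=rewrite | github.com/rshah918/Personal-Projects | Cracking The Coding Interview/uniquechar.py | hashTableUniqueChars
-- ===== SOURCE A (Python) =====
-- def hashTableUniqueChars(s):
--     #O(n)
--     s = list(s)
--     hashset = {}
--     for char in s:
--         try:
--             if hashset[char] == 1:
--                 return False
--         except:
--             hashset[char] = 1
--     return True
-- ===== SOURCE B (Python) =====
-- def hashTableUniqueChars(s):
--     # sort first, then a single adjacent-comparison pass
--     t = sorted(s)
--     return not any(a == b for a, b in zip(t, t[1:]))
-- ===== Notes on version B (the rewrite author's own statement) =====
-- stated objective: idiomatic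
-- what changed: Replaces the try/except hash-set membership loop by sorting the characters and scanning adjacent pairs for an equal neighbour.
import Mathlib
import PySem

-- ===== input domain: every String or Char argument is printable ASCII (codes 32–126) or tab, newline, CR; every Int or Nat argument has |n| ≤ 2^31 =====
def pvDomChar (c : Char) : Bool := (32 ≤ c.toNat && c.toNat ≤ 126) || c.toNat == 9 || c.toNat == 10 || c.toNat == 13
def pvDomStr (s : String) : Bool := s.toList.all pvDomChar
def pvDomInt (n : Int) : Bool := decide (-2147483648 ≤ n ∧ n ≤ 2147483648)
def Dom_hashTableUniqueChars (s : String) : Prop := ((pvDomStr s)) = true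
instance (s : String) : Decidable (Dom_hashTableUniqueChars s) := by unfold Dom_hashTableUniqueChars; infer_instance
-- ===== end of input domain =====

-- B replaces A's try/except hash-set membership loop by sorting the characters and
-- scanning adjacent pairs for an equal neighbour (no speed claim).

-- ===== PORT A =====
-- the for-loop over the characters with the dict 'hashset'; try/except KeyError = match on get?
def pvGoA : List Char → PySem.Dict Char Int → Bool
  | [], _ => true
  | c :: rest, d =>
    match d.get? c with
    | some v => if v == 1 then false else pvGoA rest d
    | none => pvGoA rest (d.insert c 1)

def hashTableUniqueChars (s : String) : Bool := pvGoA s.toList PySem.Dict.empty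

-- ===== PORT B =====
-- t = sorted(s); not any(a == b for a, b in zip(t, t[1:]))
def hashTableUniqueChars_alt (s : String) : Bool :=
  let t := PySem.List.sorted s.toList (fun x => x) false
  !(t.zip (PySem.List.slice t (some 1) none)).any (fun p => p.1 == p.2)

-- ===== PRECONDITION & SPEC =====
def Spec_hashTableUniqueChars (s : String) (out : Bool) : Prop := out = hashTableUniqueChars_alt s
instance (s : String) (out : Bool) : Decidable (Spec_hashTableUniqueChars s out) := by unfold Spec_hashTableUniqueChars; infer_instance

-- ===== CLAIM (what is proved, stated in full; the proofs are below) =====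
def Claim_equal_hashTableUniqueChars : Prop := ∀ (s : String), Dom_hashTableUniqueChars s → Spec_hashTableUniqueChars s (hashTableUniqueChars s)

-- ===== LEMMAS AND PROOFS =====

-- A's loop returns true iff the remaining characters are distinct and none is already seen
theorem pvGoA_eq (l : List Char) (d : PySem.Dict Char Int)
    (hd : ∀ c v, d.get? c = some v → v = 1) :
    pvGoA l d = decide (l.Nodup ∧ ∀ c ∈ l, d.get? c = none) := by
  induction l generalizing d with
  | nil => simp [pvGoA]
  | cons c rest ih =>
    simp only [pvGoA]
    cases hget : d.get? c with
    | some v =>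
      have hv := hd c v hget
      subst hv
      simp [hget]
    | none =>
      rw [ih (d.insert c 1) (by
        intro x w hx
        by_cases hxc : x = c
        · subst hxc; rw [PySem.Dict.get?_insert_self] at hx; exact (Option.some.inj hx).symm
        · rw [PySem.Dict.get?_insert_of_ne d 1 hxc] at hx; exact hd x w hx)]
      simp only [List.nodup_cons, List.mem_cons, decide_eq_decide]
      constructor
      · rintro ⟨hnd, hall⟩
        refine ⟨⟨?_, hnd⟩, ?_⟩
        · intro hmem
          have := hall c hmem
          rw [PySem.Dict.get?_insert_self] at this
          simp at this
        · rintro x (rfl | hx)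
          · exact hget
          · have := hall x hx
            by_cases hxc : x = c
            · subst hxc; exact hget
            · rwa [PySem.Dict.get?_insert_of_ne d 1 hxc] at this
      · rintro ⟨⟨hcm, hnd⟩, hall⟩
        refine ⟨hnd, ?_⟩
        intro x hx
        have hxc : x ≠ c := by rintro rfl; exact hcm hx
        rw [PySem.Dict.get?_insert_of_ne d 1 hxc]
        exact hall x (Or.inr hx)

-- on a ≤-sorted list, no equal adjacent pair means no duplicates at all
theorem pvAdj_eq (t : List Char) (h : t.Pairwise (· ≤ ·)) :
    (!(t.zip t.tail).any (fun p => p.1 == p.2)) = decide t.Nodup := by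
  induction t with
  | nil => simp
  | cons a t ih =>
    cases t with
    | nil => simp
    | cons b r =>
      have hab : a ≤ b := (List.pairwise_cons.mp h).1 b (List.mem_cons_self ..)
      have htail := (List.pairwise_cons.mp h).2
      by_cases hEq : a = b
      · subst hEq
        simp
      · have hlt : a < b := lt_of_le_of_ne hab hEq
        have hnotmem : a ∉ b :: r := by
          intro hmem
          rcases List.mem_cons.mp hmem with rfl | hr
          · exact hEq rfl
          · have hbx : b ≤ a := (List.pairwise_cons.mp htail).1 a hr
            exact absurd (lt_of_lt_of_le hlt hbx) (lt_irrefl a)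
        have := ih htail
        simp only [List.zip, List.zipWith, List.tail, List.any_cons, Bool.not_or] at this ⊢
        rw [this]
        simp [List.nodup_cons, hnotmem, hEq]

theorem hashTableUniqueChars_eq (s : String) :
    hashTableUniqueChars s = decide s.toList.Nodup := by
  rw [hashTableUniqueChars, pvGoA_eq _ _ (by intro c v h; simp [PySem.Dict.get?_empty] at h)]
  simp [PySem.Dict.get?_empty]

theorem hashTableUniqueChars_alt_eq (s : String) :
    hashTableUniqueChars_alt s = decide s.toList.Nodup := by
  rw [hashTableUniqueChars_alt]
  simp only [PySem.List.slice_from_one]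
  rw [pvAdj_eq _ (PySem.List.sorted_pairwise ..)]
  rw [decide_eq_decide]
  exact (PySem.List.sorted_perm ..).nodup_iff

-- ===== VERDICT (by name: the statement is the Claim_ definition above) =====
theorem hashTableUniqueChars_spec : Claim_equal_hashTableUniqueChars := by
  intro s _
  unfold Spec_hashTableUniqueChars
  rw [hashTableUniqueChars_eq, hashTableUniqueChars_alt_eq]
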